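-- pv_equiv track=rewrite | github.com/davidleandro-w/PYTHON---Encrypt-Decrypt-Caesar-Vingenere-Playfair-Hillclimb | hillclimb.py | resultValue
-- ===== SOURCE A (Python) =====
-- def resultValue(text, key):
--     result = []
--     for i, v in enumerate(text):
--         for k in range(len(key)):
--             Z = 0
--             for j in range(1):
--                 for t in range(len(text[i])):
--                     Z += key[k][t] * text[i][t]
--                 result.append(Z % 26)
--     return result
-- ===== SOURCE B (Python) =====
-- def resultValue(text, key):
--     # Key-major pass: build a table of dot-products mod 26 per key row,
--     # then emit it transposed (text-major) to match the required order.
--     table = []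
--     for kv in key:
--         table.append([sum(kv[t] * x for t, x in enumerate(tv)) % 26 for tv in text])
--     return [table[k][i] for i in range(len(text)) for k in range(len(key))]
-- ===== Notes on version B (the rewrite author's own statement) =====
-- stated objective: alternative
-- what changed: Traverses in the opposite order: a key-major pass builds a table of per-key-row dot products mod 26 as sum over enumerate (no manual running accumulator, no degenerate range(1) loop), then the table is read out transposed (text-major) to produce A's output order.
import Mathlib
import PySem

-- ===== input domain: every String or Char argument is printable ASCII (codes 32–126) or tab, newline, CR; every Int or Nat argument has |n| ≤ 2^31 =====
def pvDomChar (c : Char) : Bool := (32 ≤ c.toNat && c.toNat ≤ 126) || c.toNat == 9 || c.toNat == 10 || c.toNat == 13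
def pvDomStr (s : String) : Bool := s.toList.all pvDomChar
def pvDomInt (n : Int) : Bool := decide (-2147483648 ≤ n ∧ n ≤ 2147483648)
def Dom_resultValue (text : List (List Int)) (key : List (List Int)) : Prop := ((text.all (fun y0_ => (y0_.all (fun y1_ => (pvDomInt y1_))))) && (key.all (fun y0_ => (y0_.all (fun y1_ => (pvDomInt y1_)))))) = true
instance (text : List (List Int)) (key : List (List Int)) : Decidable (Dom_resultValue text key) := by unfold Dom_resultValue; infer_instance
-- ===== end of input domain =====

-- B replaces A's text-major triple index loop with a key-major table pass (dot products via sum over enumerate)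
-- followed by a transposed (text-major) read-out; same cost, different traversal order.


-- ===== PORT A =====
def resultValue (text : List (List Int)) (key : List (List Int)) : List Int :=
  (PySem.List.enumerate text 0).foldl (fun result iv =>
    (PySem.List.pyRange 0 (key.length : Int) 1).foldl (fun result k =>
      ((PySem.List.pyRange 0 1 1).foldl (fun (st : List Int × Int) _j =>
          let Z := (PySem.List.pyRange 0 ((PySem.List.pyGetD text iv.1 []).length : Int) 1).foldl
            (fun Z t => Z + PySem.List.pyGetD (PySem.List.pyGetD key k []) t 0
                          * PySem.List.pyGetD (PySem.List.pyGetD text iv.1 []) t 0) st.2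
          (st.1 ++ [PySem.Int.mod Z 26], Z)) (result, (0 : Int))).1) result) []

-- ===== PORT B =====
def resultValue_alt (text : List (List Int)) (key : List (List Int)) : List Int :=
  let table := key.foldl (fun table kv =>
    table ++ [text.map (fun tv =>
      PySem.Int.mod ((PySem.List.enumerate tv 0).foldl
        (fun s p => s + PySem.List.pyGetD kv p.1 0 * p.2) 0) 26)]) []
  (PySem.List.pyRange 0 (text.length : Int) 1).flatMap (fun i =>
    (PySem.List.pyRange 0 (key.length : Int) 1).map (fun k =>
      PySem.List.pyGetD (PySem.List.pyGetD table k []) i 0))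

-- ===== PRECONDITION & SPEC =====
-- Pre_ excludes exactly the inputs where A raises IndexError (key[k][t] out of range).
def Pre_resultValue (text : List (List Int)) (key : List (List Int)) : Prop :=
  ∀ tv ∈ text, ∀ kv ∈ key, tv.length ≤ kv.length
instance (text : List (List Int)) (key : List (List Int)) : Decidable (Pre_resultValue text key) := by unfold Pre_resultValue; infer_instance
def pvWitness_resultValue : List (List Int) × List (List Int) := ([[1, 2]], [[3, 4], [5, 6]])

def Spec_resultValue (text : List (List Int)) (key : List (List Int)) (out : List Int) : Prop := out = resultValue_alt text key
instance (text : List (List Int)) (key : List (List Int)) (out : List Int) : Decidable (Spec_resultValue text key out) := by unfold Spec_resultValue; infer_instance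

-- ===== CLAIM (what is proved, stated in full; the proofs are below) =====
def Claim_equal_resultValue : Prop := ∀ (text : List (List Int)) (key : List (List Int)), Dom_resultValue text key → Pre_resultValue text key → Spec_resultValue text key (resultValue text key)
-- ===== LEMMAS AND PROOFS =====

-- A's index-based running sum over range(len(tv)) equals B's fold over the zipped rows.
lemma dot_eq (kv tv : List Int) (h : tv.length ≤ kv.length) (z : Int) :
    (PySem.List.pyRange 0 (tv.length : Int) 1).foldl
      (fun Z t => Z + PySem.List.pyGetD kv t 0 * PySem.List.pyGetD tv t 0) z
    = (kv.zip tv).foldl (fun s ab => s + ab.1 * ab.2) z := by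
  rw [PySem.List.pyRange_zero, List.foldl_map]
  simp only [PySem.List.pyGetD_natCast, Int.toNat_natCast]
  induction tv generalizing kv z with
  | nil => simp
  | cons a tv ih =>
    cases kv with
    | nil => simp at h
    | cons b kv =>
      rw [List.length_cons, List.range_succ_eq_map, List.foldl_cons, List.foldl_map]
      simp only [List.getD_cons_zero, List.getD_cons_succ]
      rw [ih kv (by simpa using h) (z + b * a)]
      simp [List.zip_cons_cons]

lemma mem_enum_getElem {α : Type} (xs : List α) (s i : Int) (v : α)
    (h : (i, v) ∈ PySem.List.enumerate xs s) :
    s ≤ i ∧ i - s < xs.length ∧ xs[(i - s).toNat]? = some v := by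
  induction xs generalizing s with
  | nil => simp [PySem.List.enumerate_nil] at h
  | cons x xs ih =>
    rw [PySem.List.enumerate_cons] at h
    rcases List.mem_cons.mp h with h | h
    · simp only [Prod.mk.injEq] at h
      obtain ⟨rfl, rfl⟩ := h
      refine ⟨le_refl _, ?_, by simp⟩
      simp only [List.length_cons]
      push_cast
      omega
    · obtain ⟨h1, h2, h3⟩ := ih (s + 1) h
      refine ⟨by omega, by simp; omega, ?_⟩
      have : (i - s).toNat = (i - (s + 1)).toNat + 1 := by omega
      rw [this, List.getElem?_cons_succ]
      exact h3

lemma pyGetD_of_mem_enum {α : Type} (xs : List α) (iv : Int × α) (d : α)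
    (h : iv ∈ PySem.List.enumerate xs 0) : PySem.List.pyGetD xs iv.1 d = iv.2 := by
  obtain ⟨h1, h2, h3⟩ := mem_enum_getElem xs 0 iv.1 iv.2 h
  rw [PySem.List.pyGetD_eq_getElem xs d (by omega) (by omega)]
  simpa using List.getElem?_eq_some_iff.mp (by simpa using h3) |>.choose_spec

lemma foldl_enumerate_snd {α β : Type} (xs : List α) (s : Int) (g : β → α → β) (init : β) :
    (PySem.List.enumerate xs s).foldl (fun acc iv => g acc iv.2) init = xs.foldl g init := by
  conv_rhs => rw [← PySem.List.map_snd_enumerate xs s]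
  rw [List.foldl_map]

-- reading column i of the key-major table, for each i in order, is the transposed (text-major) list
lemma transpose_read (text key : List (List Int)) (g : List Int → List Int → Int) :
    (List.range text.length).flatMap (fun i =>
      key.map (fun kv => (text.map (g kv)).getD i 0))
    = text.flatMap (fun tv => key.map (fun kv => g kv tv)) := by
  induction text with
  | nil => simp
  | cons tv rest ih =>
    rw [List.length_cons, List.range_succ_eq_map, List.flatMap_cons, List.flatMap_map,
      List.flatMap_cons]
    simp only [List.map_cons, List.getD_cons_zero, List.getD_cons_succ]
    exact congrArg _ ih

-- B's table-then-transpose computation, written as a double flatMap over ranges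
lemma map_range_getD {α β : Type} (xs : List α) (d : α) (G : α → β) :
    (List.range xs.length).map (fun j => G (xs.getD j d)) = xs.map G := by
  induction xs with
  | nil => simp
  | cons x xs ih =>
    rw [List.length_cons, List.range_succ_eq_map, List.map_cons, List.map_map]
    simp only [Function.comp_def, List.getD_cons_zero, List.getD_cons_succ, List.map_cons]
    rw [ih]

-- B's sum over enumerate(tv) indexing kv equals the fold over the zipped rows (indices in range).
lemma enum_dot (kv tv : List Int) (s : Int) (hs : 0 ≤ s) (h : s + tv.length ≤ kv.length) (z : Int) :
    (PySem.List.enumerate tv s).foldl (fun acc p => acc + PySem.List.pyGetD kv p.1 0 * p.2) z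
    = ((kv.drop s.toNat).zip tv).foldl (fun acc ab => acc + ab.1 * ab.2) z := by
  induction tv generalizing s z with
  | nil => simp [PySem.List.enumerate_nil]
  | cons a tv ih =>
    rw [PySem.List.enumerate_cons, List.foldl_cons]
    have hlt : s.toNat < kv.length := by simp only [List.length_cons] at h; omega
    have hget : PySem.List.pyGetD kv s 0 = kv[s.toNat] :=
      PySem.List.pyGetD_eq_getElem kv 0 hs (by omega)
    rw [show ((s, a) : Int × Int).1 = s from rfl, show ((s, a) : Int × Int).2 = a from rfl, hget,
      ← List.getElem_cons_drop hlt, List.zip_cons_cons, List.foldl_cons,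
      ih (s + 1) (by omega) (by simp only [List.length_cons] at h ⊢; omega) (z + kv[s.toNat] * a),
      show (s + 1).toNat = s.toNat + 1 by omega]

lemma alt_eq (text key : List (List Int)) :
    resultValue_alt text key = text.flatMap (fun tv => key.map (fun kv =>
      PySem.Int.mod ((PySem.List.enumerate tv 0).foldl (fun s p => s + PySem.List.pyGetD kv p.1 0 * p.2) 0) 26)) := by
  have h1 : resultValue_alt text key = (List.range text.length).flatMap (fun i =>
      key.map (fun kv => (text.map (fun tv =>
        PySem.Int.mod ((PySem.List.enumerate tv 0).foldl (fun s p => s + PySem.List.pyGetD kv p.1 0 * p.2) 0) 26)).getD i 0)) := by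
    simp only [resultValue_alt, PySem.List.foldl_append_singleton_eq_map, List.nil_append,
      PySem.List.pyRange_zero, List.flatMap_map, List.map_map, Function.comp_def,
      PySem.List.pyGetD_natCast, Int.toNat_natCast]
    congr 1
    funext a
    have := map_range_getD (key.map (fun kv => text.map (fun tv =>
        PySem.Int.mod ((PySem.List.enumerate tv 0).foldl (fun s p => s + PySem.List.pyGetD kv p.1 0 * p.2) 0) 26))) []
        (fun row => row.getD a 0)
    rw [List.length_map, List.map_map, Function.comp_def] at this
    rw [this]
  rw [h1]
  exact transpose_read text key _

-- ===== VERDICT (by name: the statement is the Claim_ definition above) =====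
theorem resultValue_spec : Claim_equal_resultValue := by
  intro text key _ hpre
  unfold Spec_resultValue resultValue
  rw [alt_eq]
  have h01 : PySem.List.pyRange 0 1 1 = [(0 : Int)] := by decide
  -- A's side: reduce to text.flatMap of key.map of zip dot products
  rw [PySem.List.foldl_congr_mem _ _
      (fun (result : List Int) (iv : Int × List Int) =>
        result ++ key.map (fun kv =>
          PySem.Int.mod ((PySem.List.enumerate iv.2 0).foldl
            (fun s p => s + PySem.List.pyGetD kv p.1 0 * p.2) 0) 26)) _ ?_]
  · rw [foldl_enumerate_snd text 0
      (fun (acc : List Int) (tv : List Int) => acc ++ key.map (fun kv =>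
        PySem.Int.mod ((PySem.List.enumerate tv 0).foldl
          (fun s p => s + PySem.List.pyGetD kv p.1 0 * p.2) 0) 26)) [],
      PySem.List.foldl_append_eq_flatMap]
    simp
  · intro acc iv hmem
    have htv : PySem.List.pyGetD text iv.1 [] = iv.2 := pyGetD_of_mem_enum text iv [] hmem
    have hivmem : iv.2 ∈ text := by
      have := List.mem_map_of_mem (f := Prod.snd) hmem
      rwa [PySem.List.map_snd_enumerate] at this
    rw [htv, h01]
    simp only [List.foldl_cons, List.foldl_nil]
    rw [PySem.List.foldl_pyRange_zero_pyGetD' key []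
      (fun (result : List Int) (kv : List Int) =>
        result ++ [PySem.Int.mod
          ((PySem.List.pyRange 0 (iv.2.length : Int) 1).foldl
            (fun Z t => Z + PySem.List.pyGetD kv t 0 * PySem.List.pyGetD iv.2 t 0) 0) 26]) acc,
      PySem.List.foldl_append_singleton_eq_map]
    congr 1
    apply List.map_congr_left
    intro kv hkv
    have hlen := hpre iv.2 hivmem kv hkv
    rw [dot_eq kv iv.2 hlen 0,
      enum_dot kv iv.2 0 (le_refl 0) (by simpa using hlen) 0]
    simp
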